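-- pv_equiv track=rewrite | github.com/poisonkumaa/kyopro_library | 素因数分解.py | getNumsOfDivisorsOfEachNumbers
-- ===== SOURCE A (Python) =====
-- def getNumsOfDivisorsOfEachNumbers(n: int):
--     # validation check
--     if not isinstance(n, int):
--         raise("[ERROR] parameter must be integer")
--     if n < 0:
--         raise("[ERROR] parameter must be not less than 0 (n >= 0)")
--     nums = [0] * (n + 1) # 0-indexed
--     for i in range(1, n + 1):
--         for j in range(i, n + 1, i):
--             nums[j] += 1
--     nums.pop(0)
--     return nums
-- ===== SOURCE B (Python) =====
-- def getNumsOfDivisorsOfEachNumbers(n: int):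
--     if n < 0:
--         raise ValueError("[ERROR] parameter must be not less than 0 (n >= 0)")
--     nums = [0] * (n + 1)
--     i = 1
--     while i * i <= n:
--         nums[i * i] += 1
--         for j in range(i * (i + 1), n + 1, i):
--             nums[j] += 2
--         i += 1
--     return nums[1:]
-- ===== Notes on version B (the rewrite author's own statement) =====
-- stated objective: faster
-- what changed: A's harmonic sieve iterates over every i in 1..n bumping all multiples; B iterates only i up to sqrt(n), adding 2 at every multiple j > i*i (counting the divisor pair (i, j/i) at once) and 1 at the square i*i, roughly halving the iteration count.
import Mathlib
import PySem

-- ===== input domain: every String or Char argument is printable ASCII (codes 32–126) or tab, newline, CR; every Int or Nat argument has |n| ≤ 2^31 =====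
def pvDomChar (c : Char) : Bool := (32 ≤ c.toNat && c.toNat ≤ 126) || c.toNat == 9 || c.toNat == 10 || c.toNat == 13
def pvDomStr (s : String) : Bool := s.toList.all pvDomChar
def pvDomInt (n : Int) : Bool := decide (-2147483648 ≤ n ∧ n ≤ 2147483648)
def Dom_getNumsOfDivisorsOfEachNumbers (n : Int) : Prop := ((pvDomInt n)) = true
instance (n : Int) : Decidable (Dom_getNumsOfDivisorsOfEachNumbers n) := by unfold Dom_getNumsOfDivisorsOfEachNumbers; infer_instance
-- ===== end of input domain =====

-- B replaces A's harmonic sieve over every i ≤ n by a paired sieve over i ≤ √n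
-- (each divisor pair (i, k/i) counted at once); measured constant-factor speed-up.

-- ===== PORT A =====
def getNumsOfDivisorsOfEachNumbers (n : Int) : List Int :=
  -- 'if n < 0: raise …' — excluded by Pre_
  let nums := List.replicate (n + 1).toNat (0 : Int)
  let nums := (PySem.List.pyRange 1 (n + 1) 1).foldl (fun nums i =>
      (PySem.List.pyRange i (n + 1) i).foldl (fun nums j =>
        PySem.List.pySetD nums j (PySem.List.pyGetD nums j 0 + 1)) nums) nums
  -- nums.pop(0); return nums
  match PySem.List.pop? nums 0 with
  | some (_, rest) => rest
  | none => []

-- ===== PORT B =====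
-- the 'while i * i <= n' loop of Source B
def altWhile (n i : Int) (nums : List Int) : List Int :=
  if _h : i * i ≤ n then
    let nums := PySem.List.pySetD nums (i * i) (PySem.List.pyGetD nums (i * i) 0 + 1)
    let nums := (PySem.List.pyRange (i * (i + 1)) (n + 1) i).foldl (fun a j =>
        PySem.List.pySetD a j (PySem.List.pyGetD a j 0 + 2)) nums
    altWhile n (i + 1) nums
  else nums
termination_by (n + 1 - i).toNat
decreasing_by
  have hii : i ≤ i * i := by nlinarith [sq_nonneg i, sq_nonneg (i-1)]
  omega

def getNumsOfDivisorsOfEachNumbers_alt (n : Int) : List Int :=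
  -- 'if n < 0: raise ValueError' — excluded by Pre_
  let nums := List.replicate (n + 1).toNat (0 : Int)
  let nums := altWhile n 1 nums
  PySem.List.slice nums (some 1) none

-- ===== PRECONDITION & SPEC =====
-- Pre_ excludes exactly n < 0, where the Python A raises.
def Pre_getNumsOfDivisorsOfEachNumbers (n : Int) : Prop := 0 ≤ n
instance (n : Int) : Decidable (Pre_getNumsOfDivisorsOfEachNumbers n) := by
  unfold Pre_getNumsOfDivisorsOfEachNumbers; infer_instance
def pvWitness_getNumsOfDivisorsOfEachNumbers : Int := 6

def Spec_getNumsOfDivisorsOfEachNumbers (n : Int) (out : List Int) : Prop := out = getNumsOfDivisorsOfEachNumbers_alt n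
instance (n : Int) (out : List Int) : Decidable (Spec_getNumsOfDivisorsOfEachNumbers n out) := by unfold Spec_getNumsOfDivisorsOfEachNumbers; infer_instance

-- ===== CLAIM (what is proved, stated in full; the proofs are below) =====
def Claim_equal_getNumsOfDivisorsOfEachNumbers : Prop := ∀ (n : Int), Dom_getNumsOfDivisorsOfEachNumbers n → Pre_getNumsOfDivisorsOfEachNumbers n → Spec_getNumsOfDivisorsOfEachNumbers n (getNumsOfDivisorsOfEachNumbers n)

-- ===== LEMMAS AND PROOFS =====
def sqIdx (n i : Int) : List Int :=
  if i * i ≤ n then i :: sqIdx n (i + 1) else []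
termination_by (n + 1 - i).toNat
decreasing_by
  have hii : i ≤ i * i := by nlinarith [sq_nonneg i, sq_nonneg (i-1)]
  omega


theorem bump_length (c : Int) (js : List Int) (xs : List Int) :
    (js.foldl (fun a j => PySem.List.pySetD a j (PySem.List.pyGetD a j 0 + c)) xs).length = xs.length := by
  induction js generalizing xs with
  | nil => rfl
  | cons j js ih => simp [List.foldl, ih, PySem.List.length_pySetD]

theorem bump_getD (c : Int) (js : List Int) (hjs : ∀ j ∈ js, 1 ≤ j) (xs : List Int)
    (k : ℕ) (hk : k < xs.length) :
    (js.foldl (fun a j => PySem.List.pySetD a j (PySem.List.pyGetD a j 0 + c)) xs).getD k 0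
      = xs.getD k 0 + c * js.count (k : Int) := by
  induction js generalizing xs with
  | nil => simp
  | cons j js ih =>
    have hj : 1 ≤ j := hjs j (by simp)
    have hj0 : (0:Int) ≤ j := by omega
    rw [List.foldl_cons, ih (fun x hx => hjs x (by simp [hx])) _
        (by rwa [PySem.List.length_pySetD])]
    rw [PySem.List.pySetD_of_nonneg _ _ hj0, PySem.List.pyGetD_of_nonneg _ _ hj0]
    rw [List.count_cons]
    by_cases hjk : j = (k : Int)
    · subst hjk
      simp only [Int.toNat_natCast, beq_self_eq_true, if_true]
      rw [List.getD_eq_getElem?_getD, List.getElem?_set_self hk]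
      simp only [Option.getD_some]
      push_cast
      ring
    · have hjt : j.toNat ≠ k := by omega
      simp only [beq_iff_eq, if_neg hjk, Nat.add_zero]
      rw [List.getD_eq_getElem?_getD, List.getElem?_set_ne hjt, ← List.getD_eq_getElem?_getD]

theorem nodup_pyRange_pos (a b s : Int) (hs : 0 < s) : (PySem.List.pyRange a b s).Nodup := by
  rw [PySem.List.pyRange_of_pos a b hs]
  refine List.Nodup.map ?_ (List.nodup_range)
  intro t1 t2 h
  simp only at h
  have : s * (t1 : Int) = s * t2 := by linarith
  have := mul_left_cancel₀ (by omega : s ≠ 0) this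
  exact_mod_cast this

theorem count_pyRange_pos (a b s : Int) (hs : 0 < s) (x : Int) :
    (PySem.List.pyRange a b s).count x
      = if a ≤ x ∧ x < b ∧ s ∣ x - a then 1 else 0 := by
  by_cases hx : x ∈ PySem.List.pyRange a b s
  · rw [List.count_eq_one_of_mem (nodup_pyRange_pos a b s hs) hx]
    rw [if_pos ((PySem.List.mem_pyRange_iff_of_pos hs x).mp hx)]
  · rw [List.count_eq_zero_of_not_mem hx, if_neg]
    exact fun h => hx ((PySem.List.mem_pyRange_iff_of_pos hs x).mpr h)

theorem filter_Icc_congr (p : ℕ → Prop) [DecidablePred p] (a b : ℕ)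
    (h : ∀ t, p t → 1 ≤ t ∧ t ≤ a ∧ t ≤ b) :
    (Finset.Icc 1 a).filter p = (Finset.Icc 1 b).filter p := by
  ext t
  simp only [Finset.mem_filter, Finset.mem_Icc]
  constructor
  · rintro ⟨_, hp⟩; exact ⟨⟨(h t hp).1, (h t hp).2.2⟩, hp⟩
  · rintro ⟨_, hp⟩; exact ⟨⟨(h t hp).1, (h t hp).2.1⟩, hp⟩

theorem card_pair (K : ℕ) (hK : 1 ≤ K) :
    ((Finset.Icc 1 K).filter (fun t => t ∣ K ∧ K < t * t)).card
      = ((Finset.Icc 1 K).filter (fun t => t ∣ K ∧ t * t < K)).card := by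
  have key : ∀ t, t ∈ (Finset.Icc 1 K) → t ∣ K →
      (K / t ∣ K ∧ 1 ≤ K / t ∧ K / t ≤ K ∧ K / t * t = K) := by
    intro t ht hd
    simp only [Finset.mem_Icc] at ht
    have hq := Nat.div_mul_cancel hd
    refine ⟨Nat.div_dvd_of_dvd hd, ?_, Nat.div_le_self _ _, hq⟩
    rcases Nat.eq_zero_or_pos (K / t) with h0 | h0
    · rw [h0] at hq; omega
    · omega
  refine Finset.card_nbij' (fun t => K / t) (fun t => K / t) ?_ ?_ ?_ ?_
  · rintro t ht
    have ht' := ht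
    simp only [Finset.coe_filter, Set.mem_setOf_eq, Finset.mem_Icc] at ht' ⊢
    obtain ⟨⟨h1, h2⟩, hd, hlt⟩ := ht'
    obtain ⟨hd', hq1, hq2, hq⟩ := key t (by simp [Finset.mem_Icc]; omega) hd
    refine ⟨⟨hq1, hq2⟩, hd', ?_⟩
    nlinarith
  · rintro t ht
    have ht' := ht
    simp only [Finset.coe_filter, Set.mem_setOf_eq, Finset.mem_Icc] at ht' ⊢
    obtain ⟨⟨h1, h2⟩, hd, hlt⟩ := ht'
    obtain ⟨hd', hq1, hq2, hq⟩ := key t (by simp [Finset.mem_Icc]; omega) hd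
    refine ⟨⟨hq1, hq2⟩, hd', ?_⟩
    nlinarith
  · rintro t ht
    simp only [Finset.coe_filter, Set.mem_setOf_eq, Finset.mem_Icc] at ht
    exact Nat.div_div_self ht.2.1 (by omega)
  · rintro t ht
    simp only [Finset.coe_filter, Set.mem_setOf_eq, Finset.mem_Icc] at ht
    exact Nat.div_div_self ht.2.1 (by omega)

theorem card_split (s : Finset ℕ) (p q : ℕ → Prop) [DecidablePred p] [DecidablePred q] :
    (s.filter p).card
      = (s.filter (fun t => p t ∧ q t)).card + (s.filter (fun t => p t ∧ ¬ q t)).card := by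
  rw [← Finset.card_filter_add_card_filter_not (s := s.filter p) q]
  rw [Finset.filter_filter, Finset.filter_filter]

theorem core_count (K s : ℕ) (hK : 1 ≤ K) (hs : Nat.sqrt K ≤ s) :
    ((Finset.Icc 1 K).filter (fun t => t ∣ K)).card
      = ((Finset.Icc 1 s).filter (fun t => t * t = K)).card
        + 2 * ((Finset.Icc 1 s).filter (fun t => t ∣ K ∧ t * t < K)).card := by
  have hb : ∀ t : ℕ, t * t ≤ K → t ≤ Nat.sqrt K := fun t h => Nat.le_sqrt.mpr h
  rw [filter_Icc_congr (fun t => t * t = K) s K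
      (fun t ht => by
        have h1 : t ≤ Nat.sqrt K := hb t (le_of_eq ht)
        have h2 : 1 ≤ t := by
          rcases Nat.eq_zero_or_pos t with h0 | h0
          · subst h0; simp at ht; omega
          · omega
        refine ⟨h2, le_trans h1 hs, ?_⟩
        nlinarith)]
  rw [filter_Icc_congr (fun t => t ∣ K ∧ t * t < K) s K
      (fun t ht => by
        obtain ⟨hd, hlt⟩ := ht
        have h2 : 1 ≤ t := by
          rcases Nat.eq_zero_or_pos t with h0 | h0
          · subst h0; rw [Nat.zero_dvd] at hd; omega
          · omega
        have h1 : t ≤ Nat.sqrt K := hb t (le_of_lt hlt)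
        refine ⟨h2, le_trans h1 hs, ?_⟩
        nlinarith)]
  rw [card_split (Finset.Icc 1 K) (fun t => t ∣ K) (fun t => t * t < K)]
  rw [card_split (Finset.Icc 1 K) (fun t => t ∣ K ∧ ¬ t * t < K) (fun t => t * t = K)]
  have e1 : (Finset.Icc 1 K).filter (fun t => (t ∣ K ∧ ¬ t * t < K) ∧ t * t = K)
      = (Finset.Icc 1 K).filter (fun t => t * t = K) := by
    apply Finset.filter_congr
    intro t _
    constructor
    · rintro ⟨_, h⟩; exact h
    · intro h; exact ⟨⟨⟨t, h.symm⟩, by omega⟩, h⟩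
  have e2 : (Finset.Icc 1 K).filter (fun t => (t ∣ K ∧ ¬ t * t < K) ∧ ¬ t * t = K)
      = (Finset.Icc 1 K).filter (fun t => t ∣ K ∧ K < t * t) := by
    apply Finset.filter_congr
    intro t _
    constructor
    · rintro ⟨⟨hd, h1⟩, h2⟩; exact ⟨hd, by omega⟩
    · rintro ⟨hd, h⟩; exact ⟨⟨hd, by omega⟩, by omega⟩
  rw [e1, e2, card_pair K hK]
  omega

theorem sqIdx_eq_pyRange (n : Int) (hn : 0 ≤ n) (i : Int) (hi : 1 ≤ i) :
    sqIdx n i = PySem.List.pyRange i ((Nat.sqrt n.toNat : Int) + 1) 1 := by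
  fun_induction sqIdx n i with
  | case1 i h ih =>
    have hi' : ((i.toNat : Int)) = i := Int.toNat_of_nonneg (by omega)
    have hik : i.toNat * i.toNat ≤ n.toNat := by
      have h2 : ((i.toNat * i.toNat : ℕ) : Int) ≤ ((n.toNat : ℕ) : Int) := by
        push_cast
        rw [hi', Int.toNat_of_nonneg hn]
        exact h
      exact_mod_cast h2
    have hsq : i.toNat ≤ Nat.sqrt n.toNat := Nat.le_sqrt.mpr hik
    rw [PySem.List.pyRange_one_cons (by omega), ih (by omega)]
  | case2 i h =>
    have hi' : ((i.toNat : Int)) = i := Int.toNat_of_nonneg (by omega)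
    have hsq : Nat.sqrt n.toNat < i.toNat := by
      by_contra hc
      push_neg at hc
      have h2 : i.toNat * i.toNat ≤ n.toNat := Nat.le_sqrt.mp (by omega)
      have h3 : i * i ≤ n := by
        have h4 : ((i.toNat * i.toNat : ℕ) : Int) ≤ ((n.toNat : ℕ) : Int) := by exact_mod_cast h2
        rw [Int.toNat_of_nonneg hn] at h4
        push_cast at h4
        rw [hi'] at h4
        exact h4
      exact h h3
    rw [PySem.List.pyRange_one_eq_nil (by omega)]

theorem range_countP (m : ℕ) (p : ℕ → Bool) :
    (List.range m).countP p = ((Finset.range m).filter (fun t => p t)).card := by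
  induction m with
  | zero => rfl
  | succ m ih =>
    rw [List.range_succ, List.countP_append, Finset.range_add_one, Finset.filter_insert]
    by_cases h : p m
    · rw [if_pos h, Finset.card_insert_of_notMem (by simp), ← ih]
      simp [h]
    · rw [if_neg h, ← ih]
      simp [h]

theorem card_shift (m : ℕ) (q : ℕ → Prop) [DecidablePred q] :
    ((Finset.range m).filter (fun u => q (u + 1))).card = ((Finset.Icc 1 m).filter q).card := by
  refine Finset.card_nbij' (fun u => u + 1) (fun t => t - 1) ?_ ?_ ?_ ?_
  · rintro u hu
    simp only [Finset.coe_filter, Set.mem_setOf_eq, Finset.mem_range, Finset.mem_Icc] at hu ⊢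
    exact ⟨⟨by omega, by omega⟩, hu.2⟩
  · rintro t ht
    simp only [Finset.coe_filter, Set.mem_setOf_eq, Finset.mem_range, Finset.mem_Icc] at ht ⊢
    obtain ⟨⟨h1, h2⟩, hq⟩ := ht
    have : t - 1 + 1 = t := by omega
    rw [this]
    exact ⟨by omega, hq⟩
  · rintro u hu; simp
  · rintro t ht
    simp only [Finset.coe_filter, Set.mem_setOf_eq, Finset.mem_Icc] at ht
    obtain ⟨⟨h1, h2⟩, -⟩ := ht
    show t - 1 + 1 = t
    omega
theorem a_char (n : Int) (is : List Int) (his : ∀ i ∈ is, 1 ≤ i) (xs : List Int)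
    (k : ℕ) (hk : k < xs.length) :
    (is.foldl (fun nums i =>
        (PySem.List.pyRange i (n + 1) i).foldl (fun nums j =>
          PySem.List.pySetD nums j (PySem.List.pyGetD nums j 0 + 1)) nums) xs).getD k 0
      = xs.getD k 0
        + (is.map (fun i => ((PySem.List.pyRange i (n + 1) i).count (k : Int) : Int))).sum := by
  induction is generalizing xs with
  | nil => simp
  | cons i is ih =>
    have hi : 1 ≤ i := his i (by simp)
    rw [List.foldl_cons, ih (fun x hx => his x (by simp [hx])) _
        (by rwa [bump_length])]
    rw [bump_getD 1 _ (fun j hj => by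
          have := (PySem.List.mem_pyRange_iff_of_pos (by omega : (0:Int) < i) j).mp hj
          omega) xs k hk]
    simp only [List.map_cons, List.sum_cons]
    ring
theorem altWhile_length (n i : Int) (xs : List Int) : (altWhile n i xs).length = xs.length := by
  fun_induction altWhile n i xs with
  | case1 i xs h nums nums2 ih => rw [ih, bump_length, PySem.List.length_pySetD]
  | case2 => rfl

theorem altWhile_getD (n i : Int) (xs : List Int) (k : ℕ) (hk : k < xs.length) (hi : 1 ≤ i) :
    (altWhile n i xs).getD k 0 = xs.getD k 0 +
      ((sqIdx n i).map (fun t => (if t * t = (k : Int) then 1 else 0)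
         + 2 * ((PySem.List.pyRange (t * (t + 1)) (n + 1) t).count (k : Int) : Int))).sum := by
  fun_induction altWhile n i xs with
  | case1 i xs h nums nums2 ih =>
    rw [sqIdx, if_pos h, List.map_cons, List.sum_cons]
    rw [ih (by rw [bump_length, PySem.List.length_pySetD]; exact hk) (by omega)]
    simp only [nums2, nums]
    rw [bump_getD 2 _ (fun j hj => by
          have := (PySem.List.mem_pyRange_iff_of_pos (by omega : (0:Int) < i) j).mp hj
          nlinarith) _ k (by rw [PySem.List.length_pySetD]; exact hk)]
    have single : PySem.List.pySetD xs (i*i) (PySem.List.pyGetD xs (i*i) 0 + 1)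
        = [i*i].foldl (fun a j => PySem.List.pySetD a j (PySem.List.pyGetD a j 0 + 1)) xs := rfl
    rw [single, bump_getD 1 _ (fun j hj => by simp at hj; subst hj; nlinarith) xs k hk]
    rw [List.count_singleton]
    simp only [beq_iff_eq, one_mul]
    push_cast
    ring
  | case2 i xs h =>
    rw [sqIdx, if_neg h]
    simp

theorem a_len (n : Int) (is : List Int) (xs : List Int) :
    (is.foldl (fun nums i =>
        (PySem.List.pyRange i (n + 1) i).foldl (fun nums j =>
          PySem.List.pySetD nums j (PySem.List.pyGetD nums j 0 + 1)) nums) xs).length = xs.length := by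
  induction is generalizing xs with
  | nil => rfl
  | cons i is ih => rw [List.foldl_cons, ih, bump_length]

def divCard (K : ℕ) : ℕ := ((Finset.Icc 1 K).filter (fun t => t ∣ K)).card

theorem a_arr_getD (n : Int) (hn : 0 ≤ n) (K : ℕ) (hK1 : 1 ≤ K) (hK2 : K ≤ n.toNat) :
    ((PySem.List.pyRange 1 (n + 1) 1).foldl (fun nums i =>
        (PySem.List.pyRange i (n + 1) i).foldl (fun nums j =>
          PySem.List.pySetD nums j (PySem.List.pyGetD nums j 0 + 1)) nums)
      (List.replicate (n + 1).toNat (0 : Int))).getD K 0 = (divCard K : Int) := by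
  rw [a_char n _ (fun x hx => ((PySem.List.mem_pyRange_one).mp hx).1) _ K
      (by rw [List.length_replicate]; omega)]
  rw [List.getD_replicate (x := (0:Int)) (by omega)]
  rw [PySem.List.pyRange_one 1 (n + 1), List.map_map]
  have hN : (n + 1 - 1).toNat = n.toNat := by omega
  rw [hN]
  rw [List.map_congr_left (g := fun u : ℕ =>
        if (decide ((u + 1) ∣ K ∧ u + 1 ≤ K)) = true then (1 : Int) else 0)
      (fun u hu => by
        simp only [Function.comp_apply]
        rw [count_pyRange_pos _ _ _ (by omega : (0:Int) < 1 + (u:Int))]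
        have hcast : ((u + 1 : ℕ) : Int) = 1 + (u : Int) := by push_cast; ring
        have hdvd : ((1 + (u:Int)) ∣ (K:Int) - (1 + (u:Int))) ↔ ((u + 1) ∣ K) := by
          rw [dvd_sub_self_right, ← hcast, Int.natCast_dvd_natCast]
        have hKn : ((K:Int)) < n + 1 := by omega
        by_cases hc : (u + 1) ∣ K ∧ u + 1 ≤ K
        · rw [if_pos ⟨by omega, hKn, hdvd.mpr hc.1⟩,
              if_pos (by simp only [decide_eq_true_eq]; exact hc)]
          simp
        · rw [if_neg (by
              rintro ⟨h1, -, h3⟩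
              exact hc ⟨hdvd.mp h3, by omega⟩),
              if_neg (by simp only [decide_eq_true_eq]; exact hc)]
          simp)]
  rw [PySem.List.sum_map_ite_one_zero (fun u => decide ((u + 1) ∣ K ∧ u + 1 ≤ K))]
  rw [range_countP]
  have h1 : (Finset.range n.toNat).filter (fun t => decide ((t + 1) ∣ K ∧ t + 1 ≤ K) = true)
      = (Finset.range n.toNat).filter (fun u => (fun t => t ∣ K ∧ t ≤ K) (u + 1)) := by
    ext u
    simp
  rw [h1, card_shift n.toNat (fun t => t ∣ K ∧ t ≤ K)]
  rw [filter_Icc_congr (fun t => t ∣ K ∧ t ≤ K) n.toNat K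
      (fun t ht => ⟨Nat.pos_of_dvd_of_pos ht.1 (by omega), by omega, ht.2⟩)]
  have h3 : (Finset.Icc 1 K).filter (fun t => t ∣ K ∧ t ≤ K)
      = (Finset.Icc 1 K).filter (fun t => t ∣ K) := by
    ext t
    simp only [Finset.mem_filter, Finset.mem_Icc]
    constructor
    · rintro ⟨hm, hd, -⟩; exact ⟨hm, hd⟩
    · rintro ⟨hm, hd⟩; exact ⟨hm, hd, hm.2⟩
  rw [h3]
  unfold divCard
  omega

theorem b_arr_getD (n : Int) (hn : 0 ≤ n) (K : ℕ) (hK1 : 1 ≤ K) (hK2 : K ≤ n.toNat) :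
    (altWhile n 1 (List.replicate (n + 1).toNat (0 : Int))).getD K 0 = (divCard K : Int) := by
  rw [altWhile_getD n 1 _ K (by rw [List.length_replicate]; omega) (le_refl 1)]
  rw [List.getD_replicate (x := (0:Int)) (by omega)]
  rw [sqIdx_eq_pyRange n hn 1 (by omega)]
  rw [PySem.List.pyRange_one 1 _, List.map_map]
  have hS : ((Nat.sqrt n.toNat : Int) + 1 - 1).toNat = Nat.sqrt n.toNat := by omega
  rw [hS]
  rw [List.map_congr_left (g := fun u : ℕ =>
        (if (decide ((u + 1) * (u + 1) = K)) = true then (1 : Int) else 0)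
        + 2 * (if (decide ((u + 1) ∣ K ∧ (u + 1) * (u + 1) < K)) = true then (1 : Int) else 0))
      (fun u hu => by
        simp only [Function.comp_apply]
        rw [count_pyRange_pos _ _ _ (by omega : (0:Int) < 1 + (u:Int))]
        have hcast : ((u + 1 : ℕ) : Int) = 1 + (u : Int) := by push_cast; ring
        have hq : ((1 + (u:Int)) * (1 + (u:Int)) = (K:Int)) ↔ ((u + 1) * (u + 1) = K) := by
          rw [← hcast]
          exact_mod_cast Iff.rfl
        have e1 : (if (1 + (u:Int)) * (1 + (u:Int)) = (K:Int) then (1:Int) else 0)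
            = (if (decide ((u + 1) * (u + 1) = K)) = true then (1:Int) else 0) := by
          by_cases h : (u + 1) * (u + 1) = K
          · rw [if_pos (hq.mpr h), if_pos (by simp only [decide_eq_true_eq]; exact h)]
          · rw [if_neg (fun hx => h (hq.mp hx)), if_neg (by simp only [decide_eq_true_eq]; exact h)]
        have hdvd : ((1 + (u:Int)) ∣ (K:Int) - (1 + (u:Int)) * (1 + (u:Int) + 1)) ↔ ((u + 1) ∣ K) := by
          rw [dvd_sub_left (Dvd.intro _ rfl), ← hcast, Int.natCast_dvd_natCast]
        have hKn : ((K:Int)) < n + 1 := by omega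
        have hiff : ((u + 1) * (u + 1 + 1) ≤ K ∧ (u + 1) ∣ K) ↔ ((u + 1) ∣ K ∧ (u + 1) * (u + 1) < K) := by
          constructor
          · rintro ⟨h1, h2⟩
            exact ⟨h2, by nlinarith⟩
          · rintro ⟨h1, h2⟩
            obtain ⟨c, hc⟩ := h1
            have ht1 : u + 1 < c := by
              by_contra hcon
              push_neg at hcon
              nlinarith
            refine ⟨?_, ⟨c, hc⟩⟩
            calc (u + 1) * (u + 1 + 1) ≤ (u + 1) * c := Nat.mul_le_mul_left _ (by omega)
              _ = K := hc.symm
        have e2 : (((if ((1 + (u:Int)) * (1 + (u:Int) + 1) ≤ (K:Int) ∧ (K:Int) < n + 1 ∧ (1 + (u:Int)) ∣ (K:Int) - (1 + (u:Int)) * (1 + (u:Int) + 1)) then (1:ℕ) else 0) : ℕ) : Int)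
            = (if (decide ((u + 1) ∣ K ∧ (u + 1) * (u + 1) < K)) = true then (1:Int) else 0) := by
          by_cases hc : (u + 1) ∣ K ∧ (u + 1) * (u + 1) < K
          · have h6 : ((u + 1) * (u + 1 + 1) : ℕ) ≤ K := (hiff.mpr hc).1
            have h7 : (((u + 1) * (u + 1 + 1) : ℕ) : Int) ≤ (K : Int) := by exact_mod_cast h6
            push_cast at h7
            rw [if_pos ⟨by nlinarith [h7], hKn, hdvd.mpr hc.1⟩,
                if_pos (by simp only [decide_eq_true_eq]; exact hc)]
            simp
          · rw [if_neg (by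
                rintro ⟨h1, -, h3⟩
                refine hc (hiff.mp ⟨?_, hdvd.mp h3⟩)
                have h7 : (((u + 1) * (u + 1 + 1) : ℕ) : Int) ≤ (K : Int) := by push_cast; nlinarith [h1]
                exact_mod_cast h7),
                if_neg (by simp only [decide_eq_true_eq]; exact hc)]
            simp
        rw [e2, e1])]
  rw [PySem.List.sum_map_add_int]
  rw [PySem.List.sum_map_ite_one_zero (fun u => decide ((u + 1) * (u + 1) = K))]
  rw [List.sum_map_mul_left]
  rw [PySem.List.sum_map_ite_one_zero (fun u => decide ((u + 1) ∣ K ∧ (u + 1) * (u + 1) < K))]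
  rw [range_countP, range_countP]
  have h1 : (Finset.range (Nat.sqrt n.toNat)).filter (fun t => decide ((t + 1) * (t + 1) = K) = true)
      = (Finset.range (Nat.sqrt n.toNat)).filter (fun u => (fun t => t * t = K) (u + 1)) := by
    ext u; simp
  have h2 : (Finset.range (Nat.sqrt n.toNat)).filter (fun t => decide ((t + 1) ∣ K ∧ (t + 1) * (t + 1) < K) = true)
      = (Finset.range (Nat.sqrt n.toNat)).filter (fun u => (fun t => t ∣ K ∧ t * t < K) (u + 1)) := by
    ext u; simp
  rw [h1, h2, card_shift _ (fun t => t * t = K), card_shift _ (fun t => t ∣ K ∧ t * t < K)]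
  have hcore := core_count K (Nat.sqrt n.toNat) hK1 (Nat.sqrt_le_sqrt hK2)
  unfold divCard
  rw [hcore]
  push_cast
  ring

theorem getNums_final : ∀ (n : Int), 0 ≤ n →
    getNumsOfDivisorsOfEachNumbers n = getNumsOfDivisorsOfEachNumbers_alt n := by
  intro n hpre
  unfold getNumsOfDivisorsOfEachNumbers getNumsOfDivisorsOfEachNumbers_alt
  dsimp only
  rw [PySem.List.slice_from _ (by omega : (0:Int) ≤ 1), show (1:Int).toNat = 1 from rfl]
  have hAlen : ((PySem.List.pyRange 1 (n + 1) 1).foldl (fun nums i =>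
      (PySem.List.pyRange i (n + 1) i).foldl (fun nums j =>
        PySem.List.pySetD nums j (PySem.List.pyGetD nums j 0 + 1)) nums)
      (List.replicate (n + 1).toNat (0 : Int))).length = (n + 1).toNat := by
    rw [a_len, List.length_replicate]
  obtain ⟨y, ys, hA⟩ := List.exists_cons_of_ne_nil
    (List.ne_nil_of_length_pos (by rw [hAlen]; omega))
  rw [hA, PySem.List.pop?_zero_cons]
  dsimp only
  have hyslen : ys.length = n.toNat := by
    rw [hA] at hAlen
    simp at hAlen
    omega
  have hBlen : (altWhile n 1 (List.replicate (n + 1).toNat (0 : Int))).length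
      = (n + 1).toNat := by
    rw [altWhile_length, List.length_replicate]
  apply List.ext_getElem
  · rw [List.length_drop, hBlen, hyslen]
    omega
  · intro k h1 h2
    have hkN : k + 1 ≤ n.toNat := by rw [hyslen] at h1; omega
    have e3 : ys[k] = (y :: ys).getD (k + 1) 0 := by
      rw [List.getD_cons_succ, List.getD_eq_getElem _ _ h1]
    have e4 : ((altWhile n 1 (List.replicate (n + 1).toNat (0 : Int))).drop 1)[k]
        = (altWhile n 1 (List.replicate (n + 1).toNat (0 : Int))).getD (k + 1) 0 := by
      rw [List.getElem_drop, ← List.getD_eq_getElem _ 0 (by rw [hBlen]; omega : 1 + k < _)]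
      congr 1
      omega
    rw [e3, e4, ← hA]
    rw [a_arr_getD n hpre (k + 1) (by omega) hkN, b_arr_getD n hpre (k + 1) (by omega) hkN]

-- ===== VERDICT (by name: the statement is the Claim_ definition above) =====
theorem getNumsOfDivisorsOfEachNumbers_spec : Claim_equal_getNumsOfDivisorsOfEachNumbers := by
  intro n _ hpre
  unfold Spec_getNumsOfDivisorsOfEachNumbers
  exact getNums_final n hpre
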